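-- pv_equiv track=rewrite | github.com/AsalBahrami/Python_tutorials | Max_of_array_recursion.py | maxOfLeft
-- ===== SOURCE A (Python) =====
-- def maxOfLeft(list,left,m):
--     currentMax=0
--     currentSum=0
--     #for mid of list to the left
--     for l in range(m,left-1,-1):
--         currentSum+=list[l]
--         if currentMax<currentSum:
--             currentMax=currentSum
--     return currentMax
-- ===== SOURCE B (Python) =====
-- def maxOfLeft(list, left, m):
--     # forward clamped recurrence: best(l) = max(0, list[l] + best(l-1)), best(left-1) = 0;
--     # a single accumulator clamped at 0 each step, no separate running-sum/running-max pair
--     best = 0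
--     for l in range(left, m + 1):
--         best = max(0, list[l] + best)
--     return best
-- ===== Notes on version B (the rewrite author's own statement) =====
-- stated objective: alternative
-- what changed: Replaces the backward loop with its separate running-sum and running-max variables by a forward pass with a single accumulator clamped at zero each step (best = max(0, list[l] + best)).
import Mathlib
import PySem

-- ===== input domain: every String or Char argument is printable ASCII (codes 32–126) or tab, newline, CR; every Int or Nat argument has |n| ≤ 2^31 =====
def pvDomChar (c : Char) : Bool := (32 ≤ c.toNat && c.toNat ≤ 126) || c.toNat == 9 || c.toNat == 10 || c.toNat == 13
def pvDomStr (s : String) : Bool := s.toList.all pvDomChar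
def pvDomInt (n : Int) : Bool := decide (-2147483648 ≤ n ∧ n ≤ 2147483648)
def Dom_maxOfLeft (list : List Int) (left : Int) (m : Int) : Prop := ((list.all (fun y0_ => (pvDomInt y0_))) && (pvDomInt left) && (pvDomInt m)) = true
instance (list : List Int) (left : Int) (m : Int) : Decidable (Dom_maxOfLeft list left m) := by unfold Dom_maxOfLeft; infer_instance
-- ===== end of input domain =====

-- ===== PORT A =====
-- B replaces A's backward loop with its (sum, max) accumulator pair by a forward pass
-- with one clamped accumulator: best = max(0, list[l] + best); same cost, simpler state.
def maxOfLeft (list : List Int) (left : Int) (m : Int) : Int :=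
  ((PySem.List.pyRange m (left - 1) (-1)).foldl
    (fun (st : Int × Int) l =>
      let cs := st.2 + PySem.List.pyGetD list l 0
      (if st.1 < cs then cs else st.1, cs)) (0, 0)).1

-- ===== PORT B =====
def maxOfLeft_alt (list : List Int) (left : Int) (m : Int) : Int :=
  (PySem.List.pyRange left (m + 1) 1).foldl
    (fun best l => max 0 (PySem.List.pyGetD list l 0 + best)) 0

-- ===== PRECONDITION & SPEC =====
-- Pre_ excludes exactly the inputs where Python A raises IndexError: some index in
-- range(m, left-1, -1) outside [-len(list), len(list)).
def Pre_maxOfLeft (list : List Int) (left : Int) (m : Int) : Prop :=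
  left ≤ m → (-(list.length : Int) ≤ left ∧ m < (list.length : Int))
instance (list : List Int) (left : Int) (m : Int) : Decidable (Pre_maxOfLeft list left m) := by
  unfold Pre_maxOfLeft; infer_instance
def pvWitness_maxOfLeft : List Int × Int × Int := ([1, -2, 3], 0, 2)
def Spec_maxOfLeft (list : List Int) (left : Int) (m : Int) (out : Int) : Prop := out = maxOfLeft_alt list left m
instance (list : List Int) (left : Int) (m : Int) (out : Int) : Decidable (Spec_maxOfLeft list left m out) := by unfold Spec_maxOfLeft; infer_instance

-- ===== CLAIM (what is proved, stated in full; the proofs are below) =====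
def Claim_equal_maxOfLeft : Prop := ∀ (list : List Int) (left : Int) (m : Int), Dom_maxOfLeft list left m → Pre_maxOfLeft list left m → Spec_maxOfLeft list left m (maxOfLeft list left m)

-- ===== LEMMAS AND PROOFS =====

-- max(0, best prefix sum) of a value list
def pvF : List Int → Int
  | [] => 0
  | x :: l => max 0 (x + pvF l)

theorem pvF_nonneg (xs : List Int) : 0 ≤ pvF xs := by
  cases xs with
  | nil => simp [pvF]
  | cons x l => simp [pvF]

theorem pvFoldA (xs : List Int) : ∀ cm cs : Int, cs ≤ cm →
    (xs.foldl (fun (st : Int × Int) x =>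
      let cs := st.2 + x
      (if st.1 < cs then cs else st.1, cs)) (cm, cs)).1 = max cm (cs + pvF xs) := by
  induction xs with
  | nil => intro cm cs h; simp [pvF]; omega
  | cons x l ih =>
    intro cm cs h
    have hf := pvF_nonneg l
    simp only [List.foldl_cons, pvF]
    rw [ih (if cm < cs + x then cs + x else cm) (cs + x) (by split <;> omega)]
    split <;> omega

-- pvF is the foldr form of the clamped recurrence
theorem pvF_foldr (xs : List Int) : pvF xs = xs.foldr (fun x b => max 0 (x + b)) 0 := by
  induction xs with
  | nil => simp [pvF]
  | cons x l ih => simp [pvF, ih]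

-- B's forward clamped fold computes pvF of the values read from m down to left
theorem pvAltEq (list : List Int) (left : Int) (m : Int) :
    maxOfLeft_alt list left m
      = pvF (((PySem.List.pyRange left (m + 1) 1).map (fun l => PySem.List.pyGetD list l 0)).reverse) := by
  unfold maxOfLeft_alt
  conv_rhs => rw [pvF_foldr, List.foldr_reverse, List.foldl_map]

-- ===== VERDICT (by name: the statement is the Claim_ definition above) =====
theorem maxOfLeft_spec : Claim_equal_maxOfLeft := by
  intro list left m _ _
  unfold Spec_maxOfLeft maxOfLeft
  have hrev : PySem.List.pyRange m (left - 1) (-1)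
      = (PySem.List.pyRange left (m + 1) 1).reverse := by
    rw [PySem.List.pyRange_neg_one_eq_reverse]
    have : left - 1 + 1 = left := by ring
    rw [this]
  rw [hrev]
  have hA : ((PySem.List.pyRange left (m + 1) 1).reverse.foldl (fun (st : Int × Int) l =>
      let cs := st.2 + PySem.List.pyGetD list l 0
      (if st.1 < cs then cs else st.1, cs)) (0, 0))
      = (((PySem.List.pyRange left (m + 1) 1).reverse.map (fun l => PySem.List.pyGetD list l 0)).foldl
        (fun (st : Int × Int) x =>
          let cs := st.2 + x
          (if st.1 < cs then cs else st.1, cs)) (0, 0)) := by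
    rw [List.foldl_map]
  rw [hA, pvFoldA _ 0 0 le_rfl, List.map_reverse,
    ← pvAltEq list left m]
  have h1 := pvF_nonneg (((PySem.List.pyRange left (m + 1) 1).map (fun l => PySem.List.pyGetD list l 0)).reverse)
  rw [← pvAltEq list left m] at h1
  omega
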